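-- pv_equiv track=rewrite | github.com/shyamshyam018/DFA-for-efficient-keyword-based-content-search-using-Streamlit | app.py | match_dfa
-- ===== SOURCE A (Python) =====
-- def build_dfa(pattern):
--     pattern = pattern.lower()
--     dfa = [{} for _ in range(len(pattern)+1)]
--     dfa[0][pattern[0]] = 1
--     X = 0
--     for i in range(1, len(pattern)):
--         for c in set(pattern):
--             dfa[i][c] = dfa[X].get(c, 0)
--         dfa[i][pattern[i]] = i + 1
--         X = dfa[X].get(pattern[i], 0)
--     return dfa
--
-- def match_dfa(text, pattern):
--     dfa = build_dfa(pattern)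
--     state = 0
--     for char in text.lower():
--         state = dfa[state].get(char, 0)
--         if state == len(pattern):
--             return True
--     return False
-- ===== SOURCE B (Python) =====
-- def match_dfa(text, pattern):
--     text = text.lower()
--     pattern = pattern.lower()
--     first = pattern[0]
--     m = len(pattern)
--     for i in range(len(text)):
--         if text[i] == first and text[i:i+m] == pattern:
--             return True
--     return False
-- ===== Notes on version B (the rewrite author's own statement) =====
-- stated objective: faster
-- what changed: Replaces the KMP-style DFA construction (per-call failure-table of dicts over set(pattern)) and per-character state-machine run by a direct positional scan with a first-character filter and slice comparison.
import Mathlib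
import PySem

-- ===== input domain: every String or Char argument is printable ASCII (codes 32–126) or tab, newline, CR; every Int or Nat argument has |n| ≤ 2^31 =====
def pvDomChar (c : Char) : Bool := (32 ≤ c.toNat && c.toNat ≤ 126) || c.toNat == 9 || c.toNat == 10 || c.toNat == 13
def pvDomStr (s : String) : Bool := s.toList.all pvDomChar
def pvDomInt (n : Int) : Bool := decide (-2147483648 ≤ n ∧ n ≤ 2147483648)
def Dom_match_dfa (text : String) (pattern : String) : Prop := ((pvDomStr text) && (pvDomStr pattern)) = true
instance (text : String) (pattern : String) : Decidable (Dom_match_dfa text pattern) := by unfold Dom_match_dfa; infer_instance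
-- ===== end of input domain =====

-- B replaces A's KMP-style DFA (failure-table construction + state-machine run) by a direct
-- positional scan with a first-character filter and slice comparison; objective: simpler.

-- ===== PORT A =====
-- inner loop 'for c in set(pattern): dfa[i][c] = dfa[X].get(c, 0)' (values do not depend on
-- the set's iteration order: each distinct key is written once, and only .get is used later)
def pvCopyLoop (i X : Nat) (cs : List Char) (dfa : List (PySem.Dict Char Nat)) :
    List (PySem.Dict Char Nat) :=
  cs.foldl (fun dfa c =>
    dfa.set i ((dfa.getD i PySem.Dict.empty).insert c
      ((dfa.getD X PySem.Dict.empty).getD c 0))) dfa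

-- one iteration of 'for i in range(1, len(pattern))' in build_dfa
def pvBuildStep (p : List Char) (st : List (PySem.Dict Char Nat) × Nat) (i : Nat) :
    List (PySem.Dict Char Nat) × Nat :=
  let dfa := pvCopyLoop i st.2 (PySem.Set.ofList p) st.1
  let dfa := dfa.set i ((dfa.getD i PySem.Dict.empty).insert (p.getD i default) (i + 1))
  (dfa, (dfa.getD st.2 PySem.Dict.empty).getD (p.getD i default) 0)

-- build_dfa(pattern) on the lowered pattern p; 'dfa[0][pattern[0]] = 1' raises IndexError in
-- Python when p = [] (excluded by Pre_), here p.getD 0 default is written instead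
def pvBuildDfa (p : List Char) : List (PySem.Dict Char Nat) :=
  let dfa0 : List (PySem.Dict Char Nat) := (List.range (p.length + 1)).map (fun _ => PySem.Dict.empty)
  let dfa0 := dfa0.set 0 (PySem.Dict.empty.insert (p.getD 0 default) 1)
  ((PySem.List.pyRange 1 (p.length : Int) 1).foldl (fun st i => pvBuildStep p st i.toNat) (dfa0, 0)).1

-- 'for char in text.lower(): state = dfa[state].get(char, 0); if state == len(pattern): return True'
def pvRunDfa (dfa : List (PySem.Dict Char Nat)) (m : Nat) : Nat → List Char → Bool
  | _, [] => false
  | state, c :: rest =>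
    let s' := (dfa.getD state PySem.Dict.empty).getD c 0
    if s' = m then true else pvRunDfa dfa m s' rest

def match_dfa (text : String) (pattern : String) : Bool :=
  let p := PySem.Chars.lower pattern.toList
  -- len(pattern) = p.length: lower is character-wise and preserves length
  pvRunDfa (pvBuildDfa p) p.length 0 (PySem.Chars.lower text.toList)

-- ===== PORT B =====
-- naive scan: first-character filter + slice comparison (Source B)
def match_dfa_alt (text : String) (pattern : String) : Bool :=
  let t := PySem.Chars.lower text.toList
  let p := PySem.Chars.lower pattern.toList
  let first := p.getD 0 default   -- pattern[0]; IndexError on empty pattern is excluded by Pre_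
  let m : Int := PySem.Chars.len p
  (PySem.List.pyRange 0 (PySem.Chars.len t) 1).any (fun i =>
    PySem.List.pyGetD t i default == first &&
      PySem.List.slice t (some i) (some (i + m)) == p)

-- ===== PRECONDITION & SPEC =====
-- Pre_ excludes only the empty pattern, on which both A and B raise IndexError (pattern[0]).
def Pre_match_dfa (text : String) (pattern : String) : Prop := pattern ≠ ""
instance (text : String) (pattern : String) : Decidable (Pre_match_dfa text pattern) := by unfold Pre_match_dfa; infer_instance
def pvWitness_match_dfa : String × String := ("abRacadabra", "Cad")

def Spec_match_dfa (text : String) (pattern : String) (out : Bool) : Prop := out = match_dfa_alt text pattern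
instance (text : String) (pattern : String) (out : Bool) : Decidable (Spec_match_dfa text pattern out) := by unfold Spec_match_dfa; infer_instance

-- ===== CLAIM (what is proved, stated in full; the proofs are below) =====
def Claim_equal_match_dfa : Prop := ∀ (text : String) (pattern : String), Dom_match_dfa text pattern → Pre_match_dfa text pattern → Spec_match_dfa text pattern (match_dfa text pattern)

-- ===== LEMMAS AND PROOFS =====

-- pvF p w = length of the longest prefix of p that is a suffix of w (the KMP state)
def pvF (p w : List Char) : Nat := Nat.findGreatest (fun k => p.take k <:+ w) p.length

-- the intended value of row s at character c: the state after reading (p.take s) ++ [c]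
def pvDelta (p : List Char) (s : Nat) (c : Char) : Nat := pvF p (p.take s ++ [c])

lemma pvF_le (p w : List Char) : pvF p w ≤ p.length := Nat.findGreatest_le _

lemma pvF_spec (p w : List Char) : p.take (pvF p w) <:+ w := by
  have h := Nat.findGreatest_spec (P := fun k => p.take k <:+ w)
    (Nat.zero_le p.length) (by simp)
  exact h

lemma le_pvF {p w : List Char} {k : Nat} (hk : k ≤ p.length) (h : p.take k <:+ w) :
    k ≤ pvF p w := Nat.le_findGreatest hk h

lemma pvF_le_len (p w : List Char) : pvF p w ≤ w.length := by
  have h := (pvF_spec p w).length_le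
  have h2 := pvF_le p w
  rw [List.length_take] at h
  omega

lemma pvF_nil (p : List Char) : pvF p [] = 0 :=
  Nat.le_zero.mp (by simpa using pvF_le_len p [])

lemma pvF_take (p : List Char) {j : Nat} (h : j ≤ p.length) : pvF p (p.take j) = j := by
  apply le_antisymm
  · have := pvF_le_len p (p.take j); rwa [List.length_take, min_eq_left h] at this
  · exact le_pvF h (List.suffix_refl _)

lemma pvSuffix_append_singleton {u w : List Char} (c : Char) (h : u <:+ w) :
    u ++ [c] <:+ w ++ [c] := by
  obtain ⟨t, rfl⟩ := h; exact ⟨t, by simp⟩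

-- if p.take k is a suffix of w ++ [c] and k ≥ 1 then its last character is c and the rest fits in w
lemma pvF_last_step {p w : List Char} {c : Char} {k : Nat} (h1 : 1 ≤ k) (h2 : k ≤ p.length)
    (h : p.take k <:+ w ++ [c]) : p.take (k - 1) <:+ w ∧ p.getD (k - 1) default = c := by
  have hk : k - 1 < p.length := by omega
  have ht : p.take k = p.take (k - 1) ++ [p.getD (k - 1) default] := by
    have hke : k = (k - 1) + 1 := by omega
    rw [hke, List.take_succ, List.getElem?_eq_getElem hk]
    simp [List.getD, List.getElem?_eq_getElem hk]
  rw [ht] at h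
  obtain ⟨t, hteq⟩ := h
  have h' : (t ++ p.take (k - 1)) ++ [p.getD (k - 1) default] = w ++ [c] := by
    simpa [List.append_assoc] using hteq
  obtain ⟨hl, hr⟩ := List.append_singleton_inj.mp h'
  exact ⟨⟨t, hl⟩, hr⟩

lemma pvF_append_not_mem (p w : List Char) {c : Char} (hc : c ∉ p) : pvF p (w ++ [c]) = 0 := by
  by_contra h
  have hpos : 1 ≤ pvF p (w ++ [c]) := Nat.pos_of_ne_zero h
  obtain ⟨-, h2⟩ := pvF_last_step hpos (pvF_le p _) (pvF_spec p (w ++ [c]))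
  have hk : pvF p (w ++ [c]) - 1 < p.length := by have := pvF_le p (w ++ [c]); omega
  apply hc
  rw [← h2, List.getD_eq_getElem p default hk]
  exact List.getElem_mem hk

-- the KMP substitution step: only the matched prefix matters for the next state
lemma pvF_append (p w : List Char) (c : Char) :
    pvF p (w ++ [c]) = pvF p (p.take (pvF p w) ++ [c]) := by
  have hsw : p.take (pvF p w) <:+ w := pvF_spec p w
  have hbig : p.take (pvF p w) ++ [c] <:+ w ++ [c] := pvSuffix_append_singleton c hsw
  apply le_antisymm
  · rcases Nat.eq_zero_or_pos (pvF p (w ++ [c])) with h0 | hpos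
    · simp [h0]
    · have hkm : pvF p (w ++ [c]) ≤ p.length := pvF_le p _
      have hsp : p.take (pvF p (w ++ [c])) <:+ w ++ [c] := pvF_spec p _
      obtain ⟨hpre, -⟩ := pvF_last_step hpos hkm hsp
      have hk1 : pvF p (w ++ [c]) - 1 ≤ pvF p w := le_pvF (by omega) hpre
      have hlen : (p.take (pvF p (w ++ [c]))).length ≤ (p.take (pvF p w) ++ [c]).length := by
        simp only [List.length_take, List.length_append, List.length_cons, List.length_nil]
        have := pvF_le p w
        omega
      exact le_pvF hkm (List.suffix_of_suffix_length_le hsp hbig hlen)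
  · exact le_pvF (pvF_le p _) ((pvF_spec p _).trans hbig)

-- dropping the first character of the matched text does not change the state unless the
-- full next prefix character matches
lemma pvF_drop1 {p : List Char} {i : Nat} {c : Char} (h1 : 1 ≤ i) (h2 : i < p.length)
    (hc : c ≠ p.getD i default) :
    pvF p (p.take i ++ [c]) = pvF p ((p.take i).drop 1 ++ [c]) := by
  have hsub : (p.take i).drop 1 ++ [c] <:+ p.take i ++ [c] :=
    pvSuffix_append_singleton c (List.drop_suffix 1 _)
  have hti : (p.take i).length = i := by rw [List.length_take]; omega
  apply le_antisymm
  · rcases Nat.eq_zero_or_pos (pvF p (p.take i ++ [c])) with h0 | hpos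
    · simp [h0]
    · have hkm : pvF p (p.take i ++ [c]) ≤ p.length := pvF_le p _
      have hsp : p.take (pvF p (p.take i ++ [c])) <:+ p.take i ++ [c] := pvF_spec p _
      have hki : pvF p (p.take i ++ [c]) ≤ i := by
        by_contra h'
        have hlen : pvF p (p.take i ++ [c]) ≤ i + 1 := by
          have := pvF_le_len p (p.take i ++ [c])
          simp only [List.length_append, hti, List.length_cons, List.length_nil] at this
          omega
        have heq : pvF p (p.take i ++ [c]) = i + 1 := by omega
        rw [heq] at hsp
        have hlen2 : (p.take (i + 1)).length = (p.take i ++ [c]).length := by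
          rw [List.length_take]; simp [hti]; omega
        have heq2 : p.take (i + 1) = p.take i ++ [c] := hsp.eq_of_length hlen2
        have ht : p.take (i + 1) = p.take i ++ [p.getD i default] := by
          rw [List.take_succ, List.getElem?_eq_getElem h2]
          simp [List.getD, List.getElem?_eq_getElem h2]
        rw [ht] at heq2
        exact hc ((List.append_singleton_inj.mp heq2).2.symm)
      have hlen3 : (p.take (pvF p (p.take i ++ [c]))).length ≤ ((p.take i).drop 1 ++ [c]).length := by
        simp only [List.length_take, List.length_append, List.length_drop, hti,
          List.length_cons, List.length_nil]
        omega
      exact le_pvF hkm (List.suffix_of_suffix_length_le hsp hsub hlen3)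
  · exact le_pvF (pvF_le p _) ((pvF_spec p _).trans hsub)

lemma pvDelta_step' {p : List Char} {i : Nat} {c : Char} (h1 : 1 ≤ i) (h2 : i < p.length)
    (hc : c ≠ p.getD i default) :
    pvDelta p i c = pvDelta p (pvF p ((p.take i).drop 1)) c := by
  unfold pvDelta
  rw [pvF_drop1 h1 h2 hc, pvF_append]

lemma pvDelta_self {p : List Char} {i : Nat} (h2 : i < p.length) :
    pvDelta p i (p.getD i default) = i + 1 := by
  unfold pvDelta
  have ht : p.take (i + 1) = p.take i ++ [p.getD i default] := by
    rw [List.take_succ, List.getElem?_eq_getElem h2]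
    simp [List.getD, List.getElem?_eq_getElem h2]
  rw [← ht, pvF_take p (by omega)]

lemma pvX_step {p : List Char} {i : Nat} (h1 : 1 ≤ i) (h2 : i < p.length) :
    pvDelta p (pvF p ((p.take i).drop 1)) (p.getD i default) = pvF p ((p.take (i + 1)).drop 1) := by
  have ht : p.take (i + 1) = p.take i ++ [p.getD i default] := by
    rw [List.take_succ, List.getElem?_eq_getElem h2]
    simp [List.getD, List.getElem?_eq_getElem h2]
  have hti : 1 ≤ (p.take i).length := by rw [List.length_take]; omega
  rw [ht, List.drop_append_of_le_length hti, pvF_append]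
  rfl

-- characterisation of row 0 (set before the loop)
lemma pvF_singleton {p : List Char} (hp : p ≠ []) (c : Char) :
    pvF p [c] = if c = p.getD 0 default then 1 else 0 := by
  obtain ⟨p0, ps, rfl⟩ : ∃ p0 ps, p = p0 :: ps := by
    cases p with
    | nil => exact absurd rfl hp
    | cons a t => exact ⟨a, t, rfl⟩
  have hle : pvF (p0 :: ps) [c] ≤ 1 := by simpa using pvF_le_len (p0 :: ps) [c]
  split_ifs with hc
  · refine le_antisymm hle (le_pvF (by simp) ?_)
    simp [hc, List.take]
  · rcases Nat.lt_or_ge (pvF (p0 :: ps) [c]) 1 with h | h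
    · omega
    · have heq : pvF (p0 :: ps) [c] = 1 := by omega
      have := pvF_spec (p0 :: ps) [c]
      rw [heq] at this
      simp only [List.take] at this
      have : [p0] <:+ [c] := by simpa using this
      obtain ⟨t, ht⟩ := this
      have : p0 = c := by
        cases t with
        | nil => simpa using ht
        | cons a u => exfalso; have := congrArg List.length ht; simp at this
      simp [← this] at hc
  -- leftover goal? none

-- ---- facts about the imperative construction ----

lemma pvGetD_set_self {α : Type} (l : List α) (i : Nat) (a d : α) (h : i < l.length) :
    (l.set i a).getD i d = a := by
  simp [List.getD, List.getElem?_set_self h]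

lemma pvGetD_set_ne {α : Type} (l : List α) (i j : Nat) (a d : α) (h : i ≠ j) :
    (l.set i a).getD j d = l.getD j d := by
  simp [List.getD, List.getElem?_set_ne h]

lemma pvCopyLoop_length (i X : Nat) (cs : List Char) (dfa : List (PySem.Dict Char Nat)) :
    (pvCopyLoop i X cs dfa).length = dfa.length := by
  induction cs generalizing dfa with
  | nil => rfl
  | cons c cs ih => simp [pvCopyLoop, List.foldl_cons] at ih ⊢; rw [ih, List.length_set]

lemma pvCopyLoop_getD_ne (i X : Nat) (cs : List Char) (dfa : List (PySem.Dict Char Nat))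
    (s : Nat) (hs : s ≠ i) :
    (pvCopyLoop i X cs dfa).getD s PySem.Dict.empty = dfa.getD s PySem.Dict.empty := by
  induction cs generalizing dfa with
  | nil => rfl
  | cons c cs ih =>
    simp only [pvCopyLoop, List.foldl_cons] at ih ⊢
    rw [ih, pvGetD_set_ne _ _ _ _ _ (fun h => hs h.symm)]

lemma pvCopyLoop_getD_i (i X : Nat) (hXi : X ≠ i) (cs : List Char)
    (dfa : List (PySem.Dict Char Nat)) (hi : i < dfa.length) (c : Char) :
    (((pvCopyLoop i X cs dfa).getD i PySem.Dict.empty).getD c 0) =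
      if c ∈ cs then ((dfa.getD X PySem.Dict.empty).getD c 0)
      else ((dfa.getD i PySem.Dict.empty).getD c 0) := by
  induction cs generalizing dfa with
  | nil => simp [pvCopyLoop]
  | cons c0 cs ih =>
    simp only [pvCopyLoop, List.foldl_cons] at ih ⊢
    have hlen : i < (dfa.set i ((dfa.getD i PySem.Dict.empty).insert c0
        ((dfa.getD X PySem.Dict.empty).getD c0 0))).length := by
      rwa [List.length_set]
    rw [ih _ hlen]
    rw [pvGetD_set_ne _ _ _ _ _ (Ne.symm hXi), pvGetD_set_self _ _ _ _ hi]
    by_cases hcs : c ∈ cs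
    · simp [hcs]
    · by_cases hc0 : c = c0
      · subst hc0
        simp [hcs]
      · simp [hcs, hc0, PySem.Dict.getD_insert]

-- the initial table
def pvDfa0 (p : List Char) : List (PySem.Dict Char Nat) :=
  ((List.range (p.length + 1)).map (fun _ => PySem.Dict.empty)).set 0
    (PySem.Dict.empty.insert (p.getD 0 default) 1)

lemma pvDfa0_length (p : List Char) : (pvDfa0 p).length = p.length + 1 := by
  simp [pvDfa0]

lemma pvConstRow_getD (n s : Nat) :
    (((List.range n).map (fun _ => (PySem.Dict.empty : PySem.Dict Char Nat))).getD s
      PySem.Dict.empty) = PySem.Dict.empty := by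
  simp only [List.getD, List.getElem?_map]
  cases (List.range n)[s]? <;> simp

lemma pvDfa0_getD_pos (p : List Char) (s : Nat) (hs : 0 < s) :
    (pvDfa0 p).getD s PySem.Dict.empty = PySem.Dict.empty := by
  unfold pvDfa0
  rw [pvGetD_set_ne _ _ _ _ _ (by omega), pvConstRow_getD]

-- invariant of build_dfa's outer loop
def pvGood (p : List Char) (dfa : List (PySem.Dict Char Nat)) (j : Nat) : Prop :=
  dfa.length = p.length + 1 ∧
  (∀ s, s ≤ j → ∀ c, ((dfa.getD s PySem.Dict.empty).getD c 0) = pvDelta p s c) ∧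
  (∀ s, j < s → dfa.getD s PySem.Dict.empty = PySem.Dict.empty)

lemma pvBuild_inv (p : List Char) (hp : p ≠ []) :
    ∀ n, n ≤ p.length - 1 →
      pvGood p ((List.range n).foldl (fun st k => pvBuildStep p st (k + 1)) (pvDfa0 p, 0)).1 n ∧
      ((List.range n).foldl (fun st k => pvBuildStep p st (k + 1)) (pvDfa0 p, 0)).2 =
        pvF p ((p.take (n + 1)).drop 1) := by
  have hm : 1 ≤ p.length := List.length_pos_iff.mpr hp
  intro n
  induction n with
  | zero =>
    intro _
    simp only [List.range_zero, List.foldl_nil]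
    refine ⟨⟨pvDfa0_length p, ?_, fun s hs => pvDfa0_getD_pos p s hs⟩, ?_⟩
    · intro s hs c
      interval_cases s
      unfold pvDfa0
      rw [pvGetD_set_self _ _ _ _ (by simp)]
      rw [PySem.Dict.getD_insert]
      unfold pvDelta
      rw [List.take_zero, List.nil_append, pvF_singleton hp c]
      simp [PySem.Dict.getD_empty]
    · obtain ⟨p0, ps, rfl⟩ : ∃ p0 ps, p = p0 :: ps := by
        cases p with
        | nil => exact absurd rfl hp
        | cons a t => exact ⟨a, t, rfl⟩
      simp [pvF_nil]
  | succ n ih =>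
    intro hn
    have hn' : n ≤ p.length - 1 := by omega
    obtain ⟨⟨hlen, hrows, hempty⟩, hX⟩ := ih hn'
    set st := ((List.range n).foldl (fun st k => pvBuildStep p st (k + 1)) (pvDfa0 p, 0)) with hst
    have hfold : ((List.range (n + 1)).foldl (fun st k => pvBuildStep p st (k + 1)) (pvDfa0 p, 0)) =
        pvBuildStep p st (n + 1) := by
      rw [List.range_succ, List.foldl_append, List.foldl_cons, List.foldl_nil]
    rw [hfold]
    set i := n + 1 with hi
    have hilt : i < p.length := by omega
    have hXle : st.2 ≤ n := by
      rw [hX]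
      have h1 := pvF_le_len p ((p.take i).drop 1)
      rw [List.length_drop, List.length_take] at h1
      omega
    have hXi : st.2 ≠ i := by omega
    have hilen : i < st.1.length := by omega
    -- unfold the step
    set dfa1 := pvCopyLoop i st.2 (PySem.Set.ofList p) st.1 with hdfa1
    have hlen1 : dfa1.length = p.length + 1 := by rw [hdfa1, pvCopyLoop_length]; exact hlen
    have hilen1 : i < dfa1.length := by omega
    set R := (dfa1.getD i PySem.Dict.empty).insert (p.getD i default) (i + 1) with hR
    set dfa2 := dfa1.set i R with hdfa2
    have hstep : pvBuildStep p st i =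
        (dfa2, (dfa2.getD st.2 PySem.Dict.empty).getD (p.getD i default) 0) := rfl
    rw [hstep]
    have hrow1 : ∀ c, ((dfa1.getD i PySem.Dict.empty).getD c 0) =
        if c ∈ p then pvDelta p st.2 c else 0 := by
      intro c
      rw [hdfa1, pvCopyLoop_getD_i _ _ hXi _ _ hilen]
      by_cases hc : c ∈ p
      · rw [if_pos ((PySem.Set.mem_ofList p c).mpr hc), if_pos hc, hrows st.2 hXle]
      · rw [if_neg (fun h => hc ((PySem.Set.mem_ofList p c).mp h)), if_neg hc,
          hempty i (by omega), PySem.Dict.getD_empty]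
    have hne1 : ∀ s, s ≠ i → dfa1.getD s PySem.Dict.empty = st.1.getD s PySem.Dict.empty :=
      fun s hs => pvCopyLoop_getD_ne i st.2 _ st.1 s hs
    have hrow2 : ∀ c, ((dfa2.getD i PySem.Dict.empty).getD c 0) = pvDelta p i c := by
      intro c
      rw [hdfa2, pvGetD_set_self _ _ _ _ hilen1, hR, PySem.Dict.getD_insert]
      by_cases hc : c = p.getD i default
      · rw [if_pos hc, hc, pvDelta_self hilt]
      · rw [if_neg hc, hrow1 c]
        by_cases hcp : c ∈ p
        · rw [if_pos hcp, hX, pvDelta_step' (by omega) hilt hc]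
        · rw [if_neg hcp]
          unfold pvDelta
          rw [pvF_append_not_mem p _ hcp]
    refine ⟨⟨?_, ?_, ?_⟩, ?_⟩
    · rw [hdfa2, List.length_set]; exact hlen1
    · intro s hs c
      rcases Nat.lt_or_ge s i with h | h
      · rw [hdfa2, pvGetD_set_ne _ _ _ _ _ (by omega), hne1 s (by omega), hrows s (by omega)]
      · have : s = i := by omega
        subst this
        exact hrow2 c
    · intro s hs
      rw [hdfa2, pvGetD_set_ne _ _ _ _ _ (by omega), hne1 s (by omega)]
      exact hempty s (by omega)
    · -- the new X
      rw [hdfa2, pvGetD_set_ne _ _ _ _ _ hXi.symm, hne1 st.2 hXi, hrows st.2 hXle, hX]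
      exact pvX_step (by omega) hilt

lemma pvBuildDfa_rows (p : List Char) (hp : p ≠ []) :
    ∀ s, s < p.length → ∀ c,
      (((pvBuildDfa p).getD s PySem.Dict.empty).getD c 0) = pvDelta p s c := by
  have hm : 1 ≤ p.length := List.length_pos_iff.mpr hp
  have hbuild : pvBuildDfa p =
      ((List.range (p.length - 1)).foldl (fun st k => pvBuildStep p st (k + 1)) (pvDfa0 p, 0)).1 := by
    unfold pvBuildDfa pvDfa0
    dsimp only
    rw [PySem.List.pyRange_one, List.foldl_map]
    have hcast : ((p.length : Int) - 1).toNat = p.length - 1 := by omega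
    rw [hcast]
    have hfun : (fun (st : List (PySem.Dict Char Nat) × Nat) (y : Nat) =>
        pvBuildStep p st ((1 + (y : Int)).toNat)) = fun st y => pvBuildStep p st (y + 1) := by
      funext st y
      congr 1
      omega
    rw [hfun]
  intro s hs c
  obtain ⟨⟨-, hrows, -⟩, -⟩ := pvBuild_inv p hp (p.length - 1) (le_refl _)
  rw [hbuild]
  exact hrows s (by omega) c

-- run correctness
lemma pvRun_correct (p : List Char) (dfa : List (PySem.Dict Char Nat))
    (hrows : ∀ s, s < p.length → ∀ c,
      ((dfa.getD s PySem.Dict.empty).getD c 0) = pvDelta p s c) :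
    ∀ (cs w : List Char), pvF p w < p.length →
      (pvRunDfa dfa p.length (pvF p w) cs = true ↔
        ∃ u, u <+: cs ∧ u ≠ [] ∧ p <:+ w ++ u) := by
  intro cs
  induction cs with
  | nil =>
    intro w _
    simp [pvRunDfa]
  | cons c rest ih =>
    intro w hw
    have hs' : ((dfa.getD (pvF p w) PySem.Dict.empty).getD c 0) = pvF p (w ++ [c]) := by
      rw [hrows _ hw c]; unfold pvDelta; rw [← pvF_append]
    by_cases hm : pvF p (w ++ [c]) = p.length
    · simp only [pvRunDfa, hs', hm]
      constructor
      · intro _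
        refine ⟨[c], ⟨rest, rfl⟩, by simp, ?_⟩
        have := pvF_spec p (w ++ [c])
        rwa [hm, List.take_length] at this
      · intro _; rfl
    · have hlt : pvF p (w ++ [c]) < p.length := lt_of_le_of_ne (pvF_le p _) hm
      simp only [pvRunDfa, hs', if_neg hm]
      rw [ih (w ++ [c]) hlt]
      constructor
      · rintro ⟨u, hu1, hu2, hu3⟩
        refine ⟨c :: u, ?_, by simp, ?_⟩
        · exact List.cons_prefix_cons.mpr ⟨rfl, hu1⟩
        · rwa [List.append_assoc, List.singleton_append] at hu3
      · rintro ⟨u, hu1, hu2, hu3⟩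
        cases u with
        | nil => exact absurd rfl hu2
        | cons u0 urest =>
          obtain ⟨hu0, hurest⟩ := List.cons_prefix_cons.mp hu1
          subst hu0
          cases urest with
          | nil =>
            exfalso
            apply hm
            refine le_antisymm (pvF_le p _) (le_pvF (le_refl _) ?_)
            rw [List.take_length]
            simpa using hu3
          | cons v vs =>
            refine ⟨v :: vs, hurest, by simp, ?_⟩
            rwa [List.append_assoc, List.singleton_append]

lemma pvInfix_iff (p t : List Char) (hp : p ≠ []) :
    (∃ u, u <+: t ∧ u ≠ [] ∧ p <:+ u) ↔ p <:+: t := by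
  constructor
  · rintro ⟨u, hu1, _, hu3⟩
    exact hu3.isInfix.trans hu1.isInfix
  · rintro ⟨a, b, rfl⟩
    refine ⟨a ++ p, ⟨b, by simp⟩, ?_, ⟨a, rfl⟩⟩
    intro h
    simp only [List.append_eq_nil_iff] at h
    exact hp h.2

-- A returns true exactly when the (lowered) pattern occurs in the (lowered) text
lemma pvA_iff (text pattern : String) (hp : PySem.Chars.lower pattern.toList ≠ []) :
    (match_dfa text pattern = true ↔
      PySem.Chars.lower pattern.toList <:+: PySem.Chars.lower text.toList) := by
  unfold match_dfa
  set p := PySem.Chars.lower pattern.toList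
  set t := PySem.Chars.lower text.toList
  have hm : 0 < p.length := List.length_pos_iff.mpr hp
  have h0 : (0 : Nat) = pvF p [] := (pvF_nil p).symm
  rw [h0]
  rw [pvRun_correct p (pvBuildDfa p) (pvBuildDfa_rows p hp) t [] (by rw [pvF_nil]; exact hm)]
  simp only [List.nil_append]
  exact pvInfix_iff p t hp

-- B returns true exactly when the (lowered) pattern occurs in the (lowered) text
lemma pvAny_iff (t p : List Char) (hp : p ≠ []) :
    ((PySem.List.pyRange 0 (PySem.Chars.len t) 1).any (fun i =>
      PySem.List.pyGetD t i default == p.getD 0 default &&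
        PySem.List.slice t (some i) (some (i + PySem.Chars.len p)) == p) = true) ↔
      p <:+: t := by
  obtain ⟨p0, ps, hpeq⟩ := List.exists_cons_of_ne_nil hp
  rw [List.any_eq_true]
  constructor
  · rintro ⟨i, hmem, hf⟩
    rw [PySem.List.mem_pyRange_one] at hmem
    obtain ⟨hi0, hilt⟩ := hmem
    set k := i.toNat with hk
    have hik : i = (k : Int) := by omega
    rw [hik] at hf
    have hlenp : PySem.Chars.len p = (p.length : Int) := by simp [PySem.Chars.len]
    rw [hlenp, PySem.List.slice_natCast_add] at hf
    simp only [Bool.and_eq_true, beq_iff_eq] at hf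
    obtain ⟨-, hslice⟩ := hf
    have hpre : p <+: t.drop k := by
      rw [← hslice]; exact List.take_prefix _ _
    exact hpre.isInfix.trans (List.drop_suffix k t).isInfix
  · rintro ⟨a, b, rfl⟩
    refine ⟨(a.length : Int), ?_, ?_⟩
    · rw [PySem.List.mem_pyRange_one]
      constructor
      · omega
      · have hlt : PySem.Chars.len (a ++ p ++ b) = ((a ++ p ++ b).length : Int) := by
          simp [PySem.Chars.len]
        rw [hlt]
        have hplen : 0 < p.length := List.length_pos_iff.mpr hp
        simp only [List.length_append]
        omega
    · have hlenp : PySem.Chars.len p = (p.length : Int) := by simp [PySem.Chars.len]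
      rw [hlenp, PySem.List.slice_natCast_add]
      have hdrop : (a ++ p ++ b).drop a.length = p ++ b := by
        rw [List.append_assoc, List.drop_left]
      have htake : (p ++ b).take p.length = p := List.take_left
      have hget : PySem.List.pyGetD (a ++ p ++ b) (a.length : Int) default = p.getD 0 default := by
        rw [PySem.List.pyGetD_natCast]
        simp only [List.getD]
        rw [List.append_assoc, List.getElem?_append_right (le_refl _)]
        simp [hpeq]
      rw [hget, hdrop, htake]
      simp

lemma pvB_iff (text pattern : String) (hp : PySem.Chars.lower pattern.toList ≠ []) :
    (match_dfa_alt text pattern = true ↔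
      PySem.Chars.lower pattern.toList <:+: PySem.Chars.lower text.toList) :=
  pvAny_iff (PySem.Chars.lower text.toList) (PySem.Chars.lower pattern.toList) hp

-- ===== VERDICT (by name: the statement is the Claim_ definition above) =====
theorem match_dfa_spec : Claim_equal_match_dfa := by
  intro text pattern _ hpre
  unfold Spec_match_dfa
  have hp : PySem.Chars.lower pattern.toList ≠ [] := by
    intro hn
    apply hpre
    apply String.toList_eq_nil_iff.mp
    have := congrArg List.length hn
    simpa [PySem.Chars.lower] using this
  have hA := pvA_iff text pattern hp
  have hB := pvB_iff text pattern hp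
  cases hA' : match_dfa text pattern <;> cases hB' : match_dfa_alt text pattern <;>
    simp_all
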